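-- pv_equiv track=rewrite | github.com/ysraell/backtesting-mc | src/momentum.py | implement_cc_strategy
-- ===== SOURCE A (Python) =====
-- def implement_cc_strategy(prices, cc):
--     signal = 1
--     cc_signal = [1]
--     for i in range(1, 4):
--         cc_signal.append(0)
--     for i in range(4, len(prices)):
--         if cc[i - 4] < 0 and cc[i - 3] < 0 and cc[i - 2] < 0 and cc[i - 1] < 0 and cc[i] > 0:
--             if signal != 1:
--                 signal = 1
--                 cc_signal.append(signal)
--             else:
--                 cc_signal.append(0)
--         elif cc[i - 4] > 0 and cc[i - 3] > 0 and cc[i - 2] > 0 and cc[i - 1] > 0 and cc[i] < 0: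
--             if signal != -1:
--                 signal = -1
--                 cc_signal.append(signal)
--             else:
--                 cc_signal.append(0)
--         else:
--             cc_signal.append(0)
--
--     return cc_signal
-- ===== SOURCE B (Python) =====
-- def implement_cc_strategy(prices, cc):
--     # Pass 1: crossover events from sliding windows of cc.
--     ev = []
--     for i in range(4, len(prices)):
--         w = cc[i - 4:i]
--         if all(x < 0 for x in w) and cc[i] > 0:
--             ev.append(1)
--         elif all(x > 0 for x in w) and cc[i] < 0:
--             ev.append(-1)
--         else:
--             ev.append(0)
--     # Pass 2: fold the events through the signal state machine.
--     out = [1, 0, 0, 0]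
--     sig = 1
--     for e in ev:
--         if e != 0 and e != sig:
--             sig = e
--             out.append(e)
--         else:
--             out.append(0)
--     return out
-- ===== Notes on version B (the rewrite author's own statement) =====
-- stated objective: alternative
-- what changed: B replaces A's single loop with inline five-way window comparisons by a two-pass decomposition: a first pass turns each sliding slice of cc into a crossover event (+1/-1/0) via slices and all(), and a second pass folds the event list through the signal state machine.
import Mathlib
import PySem

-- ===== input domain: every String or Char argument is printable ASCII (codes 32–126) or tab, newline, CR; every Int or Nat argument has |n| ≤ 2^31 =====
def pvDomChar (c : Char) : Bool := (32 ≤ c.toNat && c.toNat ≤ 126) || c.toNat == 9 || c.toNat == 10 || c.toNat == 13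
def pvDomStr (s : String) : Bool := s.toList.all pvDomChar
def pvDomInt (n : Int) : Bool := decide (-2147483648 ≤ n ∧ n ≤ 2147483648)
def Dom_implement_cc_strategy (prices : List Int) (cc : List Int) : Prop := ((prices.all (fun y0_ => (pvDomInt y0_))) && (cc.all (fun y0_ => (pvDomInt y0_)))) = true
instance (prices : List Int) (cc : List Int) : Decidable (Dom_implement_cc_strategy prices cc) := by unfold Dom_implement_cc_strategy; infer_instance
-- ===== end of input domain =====

-- B re-decomposes A's single loop into an events pass (slices + all) and a state-machine fold; equivalence A = B proved on Pre_ (exactly where A returns without IndexError).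

-- ===== PORT A =====
-- loop body of A's main loop, as a named helper (literal branch order and comparisons)
def stepA (cc : List Int) (st : Int × List Int) (i : Int) : Int × List Int :=
  if PySem.List.pyGetD cc (i-4) 0 < 0 ∧ PySem.List.pyGetD cc (i-3) 0 < 0 ∧ PySem.List.pyGetD cc (i-2) 0 < 0 ∧ PySem.List.pyGetD cc (i-1) 0 < 0 ∧ PySem.List.pyGetD cc i 0 > 0 then
    if st.1 ≠ 1 then (1, st.2 ++ [(1:Int)]) else (st.1, st.2 ++ [(0:Int)])
  else if PySem.List.pyGetD cc (i-4) 0 > 0 ∧ PySem.List.pyGetD cc (i-3) 0 > 0 ∧ PySem.List.pyGetD cc (i-2) 0 > 0 ∧ PySem.List.pyGetD cc (i-1) 0 > 0 ∧ PySem.List.pyGetD cc i 0 < 0 then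
    if st.1 ≠ -1 then (-1, st.2 ++ [(-1:Int)]) else (st.1, st.2 ++ [(0:Int)])
  else (st.1, st.2 ++ [(0:Int)])

def implement_cc_strategy (prices : List Int) (cc : List Int) : List Int :=
  let cc_signal : List Int := (PySem.List.pyRange 1 4 1).foldl (fun acc _ => acc ++ [(0:Int)]) [(1:Int)]
  ((PySem.List.pyRange 4 (prices.length : Int) 1).foldl (stepA cc) ((1:Int), cc_signal)).2

-- ===== PORT B =====
-- first pass: the crossover event at index i (slice window + all)
def evOf (cc : List Int) (i : Int) : Int :=
  let w := PySem.List.slice cc (some (i-4)) (some i)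
  if (∀ x ∈ w, x < 0) ∧ PySem.List.pyGetD cc i 0 > 0 then 1
  else if (∀ x ∈ w, 0 < x) ∧ PySem.List.pyGetD cc i 0 < 0 then (-1)
  else 0

-- second pass: the signal state machine, one event at a time
def stepSig (st : Int × List Int) (e : Int) : Int × List Int :=
  if e ≠ 0 ∧ e ≠ st.1 then (e, st.2 ++ [e]) else (st.1, st.2 ++ [(0:Int)])

def implement_cc_strategy_alt (prices : List Int) (cc : List Int) : List Int :=
  let ev : List Int := (PySem.List.pyRange 4 (prices.length : Int) 1).foldl (fun acc i => acc ++ [evOf cc i]) []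
  (ev.foldl stepSig ((1:Int), [1, 0, 0, 0])).2

-- ===== PRECONDITION & SPEC =====
def sgInt (x : Int) : Int := if x < 0 then -1 else if 0 < x then 1 else 0

-- stepOK cc i: at loop index i, Python A's short-circuit evaluation touches only in-range cc indices
-- (cc[i-4] is always read; each later index i-3..i is read only while the previous values share one strict sign).
def stepOK (cc : List Int) (i : Nat) : Bool :=
  decide (i - 4 < cc.length) &&
  (cc.getD (i-4) 0 == 0 ||
    (decide (i - 3 < cc.length) &&
      (!(sgInt (cc.getD (i-3) 0) == sgInt (cc.getD (i-4) 0)) ||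
        (decide (i - 2 < cc.length) &&
          (!(sgInt (cc.getD (i-2) 0) == sgInt (cc.getD (i-4) 0)) ||
            (decide (i - 1 < cc.length) &&
              (!(sgInt (cc.getD (i-1) 0) == sgInt (cc.getD (i-4) 0)) || decide (i < cc.length))))))))

-- Pre_: exactly the inputs on which Python A returns (elsewhere A raises IndexError on a cc index)
def Pre_implement_cc_strategy (prices : List Int) (cc : List Int) : Prop :=
  ∀ i < prices.length, 4 ≤ i → stepOK cc i = true

instance (prices : List Int) (cc : List Int) : Decidable (Pre_implement_cc_strategy prices cc) := by
  unfold Pre_implement_cc_strategy; infer_instance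

def pvWitness_implement_cc_strategy : List Int × List Int := ([10, 11, 12, 13, 14, 15], [-1, -2, -3, -4, 5, -6])

def Spec_implement_cc_strategy (prices : List Int) (cc : List Int) (out : List Int) : Prop := out = implement_cc_strategy_alt prices cc
instance (prices : List Int) (cc : List Int) (out : List Int) : Decidable (Spec_implement_cc_strategy prices cc out) := by unfold Spec_implement_cc_strategy; infer_instance

-- ===== CLAIM (what is proved, stated in full; the proofs are below) =====
def Claim_equal_implement_cc_strategy : Prop := ∀ (prices : List Int) (cc : List Int), Dom_implement_cc_strategy prices cc → Pre_implement_cc_strategy prices cc → Spec_implement_cc_strategy prices cc (implement_cc_strategy prices cc)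

-- ===== LEMMAS AND PROOFS =====

-- a full 4-window: a property of all elements of (drop a).take 4 is the conjunction of the four element tests
lemma window_iff (cc : List Int) (a : Nat) (h : a + 4 ≤ cc.length) (P : Int → Prop) :
    (∀ x ∈ (cc.drop a).take 4, P x) ↔
      (P (cc.getD a 0) ∧ P (cc.getD (a+1) 0) ∧ P (cc.getD (a+2) 0) ∧ P (cc.getD (a+3) 0)) := by
  have h0 : a < cc.length := by omega
  have h1 : a + 1 < cc.length := by omega
  have h2 : a + 2 < cc.length := by omega
  have h3 : a + 3 < cc.length := by omega
  rw [List.drop_eq_getElem_cons h0, List.drop_eq_getElem_cons h1,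
      List.drop_eq_getElem_cons h2, List.drop_eq_getElem_cons h3]
  rw [show List.take 4 (cc[a] :: cc[a+1] :: cc[a+2] :: cc[a+3] :: cc.drop (a+4)) =
        [cc[a], cc[a+1], cc[a+2], cc[a+3]] from rfl]
  rw [List.getD_eq_getElem cc 0 h0, List.getD_eq_getElem cc 0 h1,
      List.getD_eq_getElem cc 0 h2, List.getD_eq_getElem cc 0 h3]
  simp

-- per-step equivalence: A's loop body equals B's state machine applied to B's event
lemma step_eq (cc : List Int) (st : Int × List Int) (i : Int) (hi : 4 ≤ i) :
    stepA cc st i = stepSig st (evOf cc i) := by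
  obtain ⟨k, rfl⟩ : ∃ k : Nat, i = (k : Int) := ⟨i.toNat, (Int.toNat_of_nonneg (by omega)).symm⟩
  have hk : 4 ≤ k := by exact_mod_cast hi
  have e4 : ((k : Int) - 4) = ((k - 4 : Nat) : Int) := by omega
  have e3 : ((k : Int) - 3) = ((k - 3 : Nat) : Int) := by omega
  have e2 : ((k : Int) - 2) = ((k - 2 : Nat) : Int) := by omega
  have e1 : ((k : Int) - 1) = ((k - 1 : Nat) : Int) := by omega
  by_cases hm : k < cc.length
  · -- all five indices in range: the window slice is the full 4-window
    have hslice : PySem.List.slice cc (some ((k - 4 : Nat) : Int)) (some (k : Int)) = (cc.drop (k - 4)).take 4 := by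
      rw [PySem.List.slice_natCast]
      congr 1
      omega
    have r43 : k - 4 + 1 = k - 3 := by omega
    have r42 : k - 4 + 2 = k - 2 := by omega
    have r41 : k - 4 + 3 = k - 1 := by omega
    have hwneg : (∀ x ∈ PySem.List.slice cc (some ((k - 4 : Nat) : Int)) (some (k : Int)), x < 0) ↔
        (cc.getD (k-4) 0 < 0 ∧ cc.getD (k-3) 0 < 0 ∧ cc.getD (k-2) 0 < 0 ∧ cc.getD (k-1) 0 < 0) := by
      rw [hslice, window_iff cc (k-4) (by omega), r43, r42, r41]
    have hwpos : (∀ x ∈ PySem.List.slice cc (some ((k - 4 : Nat) : Int)) (some (k : Int)), 0 < x) ↔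
        (0 < cc.getD (k-4) 0 ∧ 0 < cc.getD (k-3) 0 ∧ 0 < cc.getD (k-2) 0 ∧ 0 < cc.getD (k-1) 0) := by
      rw [hslice, window_iff cc (k-4) (by omega), r43, r42, r41]
    simp only [stepA, evOf, stepSig, e4, e3, e2, e1, PySem.List.pyGetD_natCast, hwneg, hwpos]
    split_ifs <;> first | rfl | omega
  · -- cc[i] out of range: the port reads the default 0, so no crossover fires on either side
    have hz : PySem.List.pyGetD cc (k : Int) 0 = 0 := by
      rw [PySem.List.pyGetD_natCast]
      exact List.getD_eq_default _ _ (by omega)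
    simp [stepA, evOf, stepSig, hz]

-- ===== VERDICT (by name: the statement is the Claim_ definition above) =====
theorem implement_cc_strategy_spec : Claim_equal_implement_cc_strategy := by
  intro prices cc _hdom _hpre
  unfold Spec_implement_cc_strategy
  simp only [implement_cc_strategy, implement_cc_strategy_alt,
    PySem.List.foldl_append_singleton_eq_map, List.nil_append, List.foldl_map]
  congr 1
  apply PySem.List.foldl_congr_mem
  intro st i hi
  have h4 : (4 : Int) ≤ i := ((PySem.List.mem_pyRange_one).mp hi).1
  exact step_eq cc st i h4
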